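-- pv_equiv track=rewrite | github.com/moncio1984/stock-report | stock_report.py | ylink
-- ===== SOURCE A (Python) =====
-- def ylink(ticker, name):
--     """Nome azienda cliccabile → Yahoo Finance + [G] → Google Finance."""
--     y_url = f"https://finance.yahoo.com/quote/{ticker}"
--     # Mappa suffisso → prefisso Google Finance
--     suffix_map = {
--         ".PA": "EPA", ".MI": "BIT", ".DE": "XETRA", ".L":  "LON",
--         ".AS": "AMS", ".MC": "BME", ".SW": "SWX",   ".T":  "TYO",
--         ".KS": "KRX", ".HK": "HKEX",".AX": "ASX",  ".SA": "BVMF",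
--         ".NS": "NSE", ".BO": "BOM",
--     }
--     g_prefix = next((v for k, v in suffix_map.items() if ticker.endswith(k)), None)
--     g_base   = ticker.rsplit(".", 1)[0] if "." in ticker else ticker
--     g_url    = (f"https://www.google.com/finance/quote/{g_base}:{g_prefix}"
--                 if g_prefix else f"https://finance.yahoo.com/quote/{ticker}")
--     safe = str(name).replace('"', "&quot;").replace("<", "&lt;").replace(">", "&gt;")
--     disp = (safe[:34] + "…") if len(safe) > 34 else safe
--     return (f'<a href="{y_url}" '
--             f'style="color:#1a1a2e;text-decoration:none;font-weight:bold">{disp}</a>'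
--             f'&nbsp;<a href="{g_url}" '
--             f'style="color:#2255cc;text-decoration:none;font-size:10px;font-weight:normal">[G]</a>')
-- ===== SOURCE B (Python) =====
-- def _gprefix(seg):
--     if seg == "PA": return "EPA"
--     if seg == "MI": return "BIT"
--     if seg == "DE": return "XETRA"
--     if seg == "L":  return "LON"
--     if seg == "AS": return "AMS"
--     if seg == "MC": return "BME"
--     if seg == "SW": return "SWX"
--     if seg == "T":  return "TYO"
--     if seg == "KS": return "KRX"
--     if seg == "HK": return "HKEX"
--     if seg == "AX": return "ASX"
--     if seg == "SA": return "BVMF"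
--     if seg == "NS": return "NSE"
--     if seg == "BO": return "BOM"
--     return None
--
-- def _esc(c):
--     if c == '"': return "&quot;"
--     if c == "<": return "&lt;"
--     if c == ">": return "&gt;"
--     return c
--
-- def ylink(ticker, name):
--     """Nome azienda cliccabile -> Yahoo Finance + [G] -> Google Finance."""
--     y_url = "https://finance.yahoo.com/quote/" + ticker
--     # split at the last '.' once; the exchange prefix comes from a plain branch
--     # on the extracted segment -- no mapping table, no suffix scan
--     base, dot, seg = ticker.rpartition(".")
--     g_prefix = _gprefix(seg) if dot else None
--     g_base = base if dot else ticker
--     g_url = ("https://www.google.com/finance/quote/" + g_base + ":" + g_prefix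
--              if g_prefix else y_url)
--     # single pass over the characters instead of three staged .replace passes
--     safe = "".join(_esc(c) for c in str(name))
--     disp = safe[:34] + "…" if len(safe) > 34 else safe
--     return ('<a href="' + y_url +
--             '" style="color:#1a1a2e;text-decoration:none;font-weight:bold">' + disp + '</a>'
--             '&nbsp;<a href="' + g_url +
--             '" style="color:#2255cc;text-decoration:none;font-size:10px;font-weight:normal">[G]</a>')
-- ===== Notes on version B (the rewrite author's own statement) =====
-- stated objective: alternative
-- what changed: Drops the suffix dict entirely: ticker.rpartition('.') extracts the last segment once and a plain branch function maps it to the exchange prefix, and HTML-escaping is one single pass over the characters (join of per-char expansions) instead of three staged .replace passes.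
import Mathlib
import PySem

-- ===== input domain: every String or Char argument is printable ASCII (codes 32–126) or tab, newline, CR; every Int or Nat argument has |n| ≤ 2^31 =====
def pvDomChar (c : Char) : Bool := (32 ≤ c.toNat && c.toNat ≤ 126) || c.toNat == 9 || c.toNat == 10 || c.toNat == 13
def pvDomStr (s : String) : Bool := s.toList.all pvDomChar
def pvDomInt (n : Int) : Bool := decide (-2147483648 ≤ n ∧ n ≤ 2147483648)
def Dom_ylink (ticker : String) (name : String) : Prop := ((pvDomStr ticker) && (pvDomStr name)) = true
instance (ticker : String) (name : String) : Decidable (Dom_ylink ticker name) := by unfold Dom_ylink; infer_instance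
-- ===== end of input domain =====

-- B drops A's suffix dict and its endswith-scan: one rpartition at the last '.', a plain
-- branch on the extracted segment, and HTML-escaping in a single per-character pass
-- instead of three staged replace passes (objective: alternative; same output everywhere).

-- ===== PORT A =====
-- the suffix_map literal, in source order
def pvSuffixPairs : List (String × String) :=
  [(".PA","EPA"),(".MI","BIT"),(".DE","XETRA"),(".L","LON"),
   (".AS","AMS"),(".MC","BME"),(".SW","SWX"),(".T","TYO"),
   (".KS","KRX"),(".HK","HKEX"),(".AX","ASX"),(".SA","BVMF"),
   (".NS","NSE"),(".BO","BOM")]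

-- s.rsplit(".", 1) for a string s that contains '.': (part before last '.', part after last '.').
-- Exact hand port for this sep/maxsplit: the last '.'-segment is the maximal dot-free suffix.
def pvRsplitDot (l : List Char) : List Char × List Char :=
  let seg := (l.reverse.takeWhile (fun c => c != '.')).reverse
  (l.take (l.length - seg.length - 1), seg)

def ylink (ticker : String) (name : String) : String :=
  let cs := ticker.toList
  let y_url := "https://finance.yahoo.com/quote/".toList ++ cs
  let suffix_map := PySem.Dict.ofList pvSuffixPairs
  -- next((v for k, v in suffix_map.items() if ticker.endswith(k)), None)
  let g_prefix : Option String :=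
    (suffix_map.items.find? (fun kv => PySem.Chars.endswith cs kv.1.toList)).map (fun kv => kv.2)
  -- ticker.rsplit(".", 1)[0] if "." in ticker else ticker
  let g_base := if PySem.Chars.isIn ['.'] cs then (pvRsplitDot cs).1 else cs
  -- 'if g_prefix' truthiness: g_prefix is None or a nonempty map value, so Option matching is exact
  let g_url := match g_prefix with
    | some p => "https://www.google.com/finance/quote/".toList ++ g_base ++ [':'] ++ p.toList
    | none   => "https://finance.yahoo.com/quote/".toList ++ cs
  -- str(name) is name itself, since name is a str
  let safe := PySem.Chars.replace (PySem.Chars.replace (PySem.Chars.replace name.toList ['"'] "&quot;".toList) ['<'] "&lt;".toList) ['>'] "&gt;".toList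
  let disp := if 34 < safe.length then safe.take 34 ++ ['…'] else safe
  String.ofList ("<a href=\"".toList ++ y_url ++ "\" style=\"color:#1a1a2e;text-decoration:none;font-weight:bold\">".toList ++ disp ++ "</a>&nbsp;<a href=\"".toList ++ g_url ++ "\" style=\"color:#2255cc;text-decoration:none;font-size:10px;font-weight:normal\">[G]</a>".toList)

-- ===== PORT B =====
-- the _gprefix branch function of Source B, verbatim
def pvGPrefix (seg : List Char) : Option (List Char) :=
  if seg == ['P','A'] then some "EPA".toList else
  if seg == ['M','I'] then some "BIT".toList else
  if seg == ['D','E'] then some "XETRA".toList else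
  if seg == ['L'] then some "LON".toList else
  if seg == ['A','S'] then some "AMS".toList else
  if seg == ['M','C'] then some "BME".toList else
  if seg == ['S','W'] then some "SWX".toList else
  if seg == ['T'] then some "TYO".toList else
  if seg == ['K','S'] then some "KRX".toList else
  if seg == ['H','K'] then some "HKEX".toList else
  if seg == ['A','X'] then some "ASX".toList else
  if seg == ['S','A'] then some "BVMF".toList else
  if seg == ['N','S'] then some "NSE".toList else
  if seg == ['B','O'] then some "BOM".toList else none

-- the _esc branch function of Source B, verbatim
def pvEsc (c : Char) : List Char :=
  if c == '"' then "&quot;".toList else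
  if c == '<' then "&lt;".toList else
  if c == '>' then "&gt;".toList else [c]

-- exact hand port of s.rpartition("."): (before last '.', '.', after last '.'), or ('','',s)
def pvRPartitionDot (l : List Char) : List Char × List Char × List Char :=
  if PySem.Chars.isIn ['.'] l then
    let seg := (l.reverse.takeWhile (fun c => c != '.')).reverse
    (l.take (l.length - seg.length - 1), ['.'], seg)
  else ([], [], l)

def ylink_alt (ticker : String) (name : String) : String :=
  let cs := ticker.toList
  let y_url := "https://finance.yahoo.com/quote/".toList ++ cs
  -- base, dot, seg = ticker.rpartition(".")
  let p := pvRPartitionDot cs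
  -- g_prefix = _gprefix(seg) if dot else None  ('if dot' = dot nonempty)
  let g_prefix := if p.2.1.isEmpty then none else pvGPrefix p.2.2
  -- g_base = base if dot else ticker
  let g_base := if p.2.1.isEmpty then cs else p.1
  let g_url := match g_prefix with
    | some gp => "https://www.google.com/finance/quote/".toList ++ g_base ++ [':'] ++ gp
    | none   => y_url
  -- safe = "".join(_esc(c) for c in str(name)): one pass over the characters
  let safe := name.toList.flatMap pvEsc
  let disp := if 34 < safe.length then safe.take 34 ++ ['…'] else safe
  String.ofList ("<a href=\"".toList ++ y_url ++ "\" style=\"color:#1a1a2e;text-decoration:none;font-weight:bold\">".toList ++ disp ++ "</a>&nbsp;<a href=\"".toList ++ g_url ++ "\" style=\"color:#2255cc;text-decoration:none;font-size:10px;font-weight:normal\">[G]</a>".toList)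

-- ===== PRECONDITION & SPEC =====
def Spec_ylink (ticker : String) (name : String) (out : String) : Prop := out = ylink_alt ticker name
instance (ticker : String) (name : String) (out : String) : Decidable (Spec_ylink ticker name out) := by unfold Spec_ylink; infer_instance

-- ===== CLAIM (what is proved, stated in full; the proofs are below) =====
def Claim_equal_ylink : Prop := ∀ (ticker : String) (name : String), Dom_ylink ticker name → Spec_ylink ticker name (ylink ticker name)

-- ===== LEMMAS AND PROOFS =====

theorem pv_tw_prefix (u r : List Char) (hu : '.' ∉ u) :
    u ++ ['.'] <+: r ↔ '.' ∈ r ∧ r.takeWhile (fun c => c != '.') = u := by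
  have htake : ∀ (u : List Char), '.' ∉ u → ∀ t, (u ++ '.' :: t).takeWhile (fun c => c != '.') = u := by
    intro u hu
    induction u with
    | nil => intro t; simp
    | cons a u ih =>
      intro t
      have ha : a ≠ '.' := fun h => hu (by simp [h])
      simp only [List.cons_append, List.takeWhile_cons]
      rw [if_pos (by simpa using ha), ih (fun h => hu (by simp [h])) t]
  constructor
  · rintro ⟨t, rfl⟩
    exact ⟨by simp, by simpa using htake u hu t⟩
  · rintro ⟨hmem, htw⟩
    have hsplit := (List.takeWhile_append_dropWhile (p := fun c => c != '.') (l := r)).symm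
    have hne : r.dropWhile (fun c => c != '.') ≠ [] := by
      intro hnil
      have : r = r.takeWhile (fun c => c != '.') := by
        conv_lhs => rw [hsplit]
        rw [hnil, List.append_nil]
      rw [this, htw] at hmem
      exact hu hmem
    obtain ⟨c, t, hct⟩ := List.exists_cons_of_ne_nil hne
    have hc : c = '.' := by
      have := List.head_dropWhile_not (p := fun c => c != '.') (l := r) hne
      simp only [hct, List.head_cons] at this
      simpa using this
    refine ⟨t, ?_⟩
    rw [hsplit, htw, hct, hc]
    simp

theorem pv_endswith_key (cs tl : List Char) (h : '.' ∉ tl) :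
    PySem.Chars.endswith cs ('.' :: tl) = true ↔
      '.' ∈ cs ∧ (cs.reverse.takeWhile (fun c => c != '.')).reverse = tl := by
  rw [PySem.Chars.endswith_iff, ← List.reverse_prefix, List.reverse_cons,
    pv_tw_prefix _ _ (by simpa using h)]
  constructor
  · rintro ⟨hm, he⟩
    refine ⟨by simpa using hm, ?_⟩
    rw [he, List.reverse_reverse]
  · rintro ⟨hm, he⟩
    refine ⟨by simpa using hm, ?_⟩
    rw [← he, List.reverse_reverse]

theorem pv_str_eq_ofList_iff (k : String) (l : List Char) : (k = String.ofList l) ↔ k.toList = l := by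
  constructor
  · rintro rfl; simp
  · intro h
    have := congrArg String.ofList h
    simpa using this

-- pv_endswith_key phrased on a key string whose first char is '.' and whose tail is dot-free
theorem pv_endswith_key' (cs : List Char) (k : String) (hk : k.toList.head? = some '.')
    (h : '.' ∉ k.toList.tail) :
    PySem.Chars.endswith cs k.toList = true ↔
      '.' ∈ cs ∧ (cs.reverse.takeWhile (fun c => c != '.')).reverse = k.toList.tail := by
  rcases hl : k.toList with _ | ⟨c, tl⟩
  · rw [hl] at hk; simp at hk
  · rw [hl] at hk h
    simp only [List.head?_cons, Option.some.injEq] at hk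
    subst hk
    simpa using pv_endswith_key cs tl (by simpa using h)

theorem pv_key_case (cs : List Char) (k : String) (hk : k.toList.head? = some '.')
    (h : '.' ∉ k.toList.tail) (hmem : '.' ∈ cs) :
    PySem.Chars.endswith cs k.toList =
      (k == String.ofList ('.' :: (pvRsplitDot cs).2)) := by
  rw [Bool.eq_iff_iff, pv_endswith_key' cs k hk h]
  simp only [beq_iff_eq, pv_str_eq_ofList_iff, pvRsplitDot]
  rcases hl : k.toList with _ | ⟨c, tl⟩
  · rw [hl] at hk; simp at hk
  · rw [hl] at hk
    simp only [List.head?_cons, Option.some.injEq] at hk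
    subst hk
    simp [hmem, eq_comm]

theorem pv_find?_congr {α : Type} (l : List α) (p q : α → Bool)
    (h : ∀ x ∈ l, p x = q x) : l.find? p = l.find? q := by
  induction l with
  | nil => rfl
  | cons a t ih =>
    simp only [List.find?_cons]
    rw [h a (by simp)]
    by_cases hq : q a
    · simp [hq]
    · simp only [Bool.not_eq_true] at hq
      simp [hq, ih (fun x hx => h x (by simp [hx]))]

-- peel one literal pair off the find?-map chain
theorem pv_find_step (k v : String) (rest : List (String × String)) (K : String) :
    ((List.find? (fun kv => kv.1 == K) ((k, v) :: rest)).map (fun kv => kv.2.toList)) =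
      if k == K then some v.toList
      else (rest.find? (fun kv => kv.1 == K)).map (fun kv => kv.2.toList) := by
  by_cases h : (k == K) = true <;> simp [h]

theorem pv_beq_seg (k : String) (t seg : List Char) (hk : k.toList = '.' :: t) :
    (k == String.ofList ('.' :: seg)) = (seg == t) := by
  rw [Bool.eq_iff_iff]
  simp only [beq_iff_eq, pv_str_eq_ofList_iff, hk]
  constructor
  · intro h; injection h with _ h; exact h.symm
  · rintro rfl; rfl

-- A's endswith-scan over the suffix map equals B's branch on the last '.'-segment
theorem pv_gprefix_eq (cs : List Char) :
    ((PySem.Dict.ofList pvSuffixPairs).items.find? (fun kv => PySem.Chars.endswith cs kv.1.toList)).map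
        (fun kv => kv.2.toList) =
      (if PySem.Chars.isIn ['.'] cs then pvGPrefix (pvRsplitDot cs).2 else none) := by
  have hitems : (PySem.Dict.ofList pvSuffixPairs).items = pvSuffixPairs := by decide
  by_cases hdot : PySem.Chars.isIn ['.'] cs = true
  · have hmem : '.' ∈ cs := by
      have := (PySem.Chars.isIn_iff_infix (sub := ['.']) (s := cs)).mp hdot
      exact this.subset (by simp)
    rw [if_pos hdot, hitems,
      pv_find?_congr pvSuffixPairs _ (fun kv => kv.1 == String.ofList ('.' :: (pvRsplitDot cs).2))
        (by intro kv hkv; fin_cases hkv <;> exact pv_key_case cs _ (by decide) (by decide) hmem)]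
    simp only [pvSuffixPairs, pv_find_step,
      pv_beq_seg ".PA" ['P','A'] _ (by decide), pv_beq_seg ".MI" ['M','I'] _ (by decide),
      pv_beq_seg ".DE" ['D','E'] _ (by decide), pv_beq_seg ".L" ['L'] _ (by decide),
      pv_beq_seg ".AS" ['A','S'] _ (by decide), pv_beq_seg ".MC" ['M','C'] _ (by decide),
      pv_beq_seg ".SW" ['S','W'] _ (by decide), pv_beq_seg ".T" ['T'] _ (by decide),
      pv_beq_seg ".KS" ['K','S'] _ (by decide), pv_beq_seg ".HK" ['H','K'] _ (by decide),
      pv_beq_seg ".AX" ['A','X'] _ (by decide), pv_beq_seg ".SA" ['S','A'] _ (by decide),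
      pv_beq_seg ".NS" ['N','S'] _ (by decide), pv_beq_seg ".BO" ['B','O'] _ (by decide)]
    simp [pvGPrefix]
  · have hnmem : '.' ∉ cs := by
      intro hmem
      obtain ⟨s, t, rfl⟩ := List.append_of_mem hmem
      exact hdot ((PySem.Chars.isIn_iff_infix (sub := ['.']) (s := s ++ '.' :: t)).mpr ⟨s, t, by simp⟩)
    rw [if_neg hdot, hitems, List.find?_eq_none.mpr, Option.map_none]
    intro kv hkv
    fin_cases hkv <;>
      exact fun hew => hnmem ((pv_endswith_key' cs _ (by decide) (by decide)).mp hew).1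

-- replace with a single-char pattern is a per-character expansion
theorem pv_replace_go_single (q : Char) (r : List Char) :
    ∀ (fuel : Nat) (l acc : List Char), l.length ≤ fuel →
      PySem.Chars.replace.go [q] r fuel l acc =
        acc.reverse ++ l.flatMap (fun x => if x = q then r else [x]) := by
  intro fuel
  induction fuel with
  | zero =>
    intro l acc h
    have : l = [] := List.eq_nil_of_length_eq_zero (Nat.le_zero.mp h)
    subst this
    simp [PySem.Chars.replace.go]
  | succ n ih =>
    intro l acc h
    cases l with
    | nil => simp [PySem.Chars.replace.go]
    | cons c t =>
      simp only [PySem.Chars.replace.go]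
      by_cases hc : c = q
      · rw [if_pos (by simp [hc, List.isPrefixOf])]
        rw [ih _ _ (by simpa using Nat.le_of_succ_le_succ h)]
        simp [hc]
      · rw [if_neg (by simp [List.isPrefixOf]; simpa [eq_comm] using hc)]
        rw [ih _ _ (by simpa using Nat.le_of_succ_le_succ h)]
        simp [hc]

theorem pv_replace_single (q : Char) (r l : List Char) :
    PySem.Chars.replace l [q] r = l.flatMap (fun x => if x = q then r else [x]) := by
  rw [PySem.Chars.replace]
  rw [if_neg (by simp)]
  simpa using pv_replace_go_single q r l.length l [] le_rfl

-- A's three staged replace passes equal B's single per-character pass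
theorem pv_esc_eq (l : List Char) :
    PySem.Chars.replace (PySem.Chars.replace (PySem.Chars.replace l ['"'] "&quot;".toList)
        ['<'] "&lt;".toList) ['>'] "&gt;".toList = l.flatMap pvEsc := by
  simp only [pv_replace_single, List.flatMap_assoc]
  have hfun : (fun x => (if x = '"' then "&quot;".toList else [x]).flatMap
        (fun y => (if y = '<' then "&lt;".toList else [y]).flatMap
          (fun z => if z = '>' then "&gt;".toList else [z]))) = pvEsc := by
    funext x
    by_cases h1 : x = '"'
    · subst h1; decide
    · by_cases h2 : x = '<'
      · subst h2; decide
      · by_cases h3 : x = '>'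
        · subst h3; decide
        · simp [h1, h2, h3, pvEsc]
  rw [hfun]

theorem pv_rpart_dot (cs : List Char) (h : PySem.Chars.isIn ['.'] cs = true) :
    pvRPartitionDot cs = ((pvRsplitDot cs).1, ['.'], (pvRsplitDot cs).2) := by
  simp [pvRPartitionDot, pvRsplitDot, h]

-- ===== VERDICT (by name: the statement is the Claim_ definition above) =====
theorem ylink_spec : Claim_equal_ylink := by
  intro ticker name _
  unfold Spec_ylink ylink ylink_alt
  simp only [pv_esc_eq]
  have hg := pv_gprefix_eq ticker.toList
  by_cases hdot : PySem.Chars.isIn ['.'] ticker.toList = true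
  · rw [if_pos hdot] at hg
    cases hf : ((PySem.Dict.ofList pvSuffixPairs).items.find?
        (fun kv => PySem.Chars.endswith ticker.toList kv.1.toList)) with
    | none =>
      rw [hf, Option.map_none] at hg
      simp [pv_rpart_dot _ hdot, ← hg]
    | some kv =>
      rw [hf, Option.map_some] at hg
      simp [pv_rpart_dot _ hdot, hdot, ← hg]
  · rw [if_neg hdot] at hg
    rw [Option.map_eq_none_iff] at hg
    simp [hg, pvRPartitionDot, hdot]
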